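-- pv_equiv track=rewrite | github.com/inhahe/GPDA | gpda_scannerless.py | _utf8_byte_ranges
-- ===== SOURCE A (Python) =====
-- def _utf8_encode_cp(cp):
--     """Return the UTF-8 byte list for a code point."""
--     if cp <= 0x7F:
--         return [cp]
--     if cp <= 0x7FF:
--         return [0xC0 | (cp >> 6), 0x80 | (cp & 0x3F)]
--     if cp <= 0xFFFF:
--         return [0xE0 | (cp >> 12), 0x80 | ((cp >> 6) & 0x3F),
--                 0x80 | (cp & 0x3F)]
--     return [0xF0 | (cp >> 18), 0x80 | ((cp >> 12) & 0x3F),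
--             0x80 | ((cp >> 6) & 0x3F), 0x80 | (cp & 0x3F)]
--
-- def _utf8_byte_ranges(cp_lo, cp_hi):
--     """Given a code-point range [cp_lo, cp_hi], return a list of
--     byte-pattern alternatives.  Each alternative is a list of
--     ``(byte_lo, byte_hi)`` tuples — one per byte position — describing
--     a contiguous run of UTF-8 byte sequences that maps exactly to a
--     sub-range of the input code-point range.
--
--     Collectively the alternatives exactly cover the input range with
--     no overlaps.  Implements the standard "UTF-8 range split"
--     decomposition (used by re2 / Rust's regex-automata etc.)."""
--     if cp_lo > cp_hi:
--         return []
--     out = []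
--     tier_bounds = [0x7F, 0x7FF, 0xFFFF, 0x10FFFF]
--     lo = cp_lo
--     for boundary in tier_bounds:
--         if lo > boundary:
--             continue
--         sub_hi = min(cp_hi, boundary)
--         out.extend(_decompose_same_tier(_utf8_encode_cp(lo),
--                                          _utf8_encode_cp(sub_hi)))
--         lo = sub_hi + 1
--         if lo > cp_hi:
--             break
--     return out
--
-- def _decompose_same_tier(lo_bytes, hi_bytes):
--     """Decompose a same-length byte range into a list of byte-range
--     alternatives.  Each alternative is a list of ``(byte_lo, byte_hi)``
--     describing a contiguous run of byte sequences of this length."""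
--     assert len(lo_bytes) == len(hi_bytes)
--     n = len(lo_bytes)
--     if n == 1:
--         return [[(lo_bytes[0], hi_bytes[0])]]
--     if lo_bytes[0] == hi_bytes[0]:
--         sub = _decompose_same_tier(lo_bytes[1:], hi_bytes[1:])
--         return [[(lo_bytes[0], lo_bytes[0])] + r for r in sub]
--     out = []
--     # Low-edge: fixed first byte = lo_bytes[0], tail goes from lo_bytes[1:]
--     # up to [0xBF]*(n-1).
--     sub = _decompose_same_tier(lo_bytes[1:], [0xBF] * (n - 1))
--     out.extend([[(lo_bytes[0], lo_bytes[0])] + r for r in sub])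
--     # Middle: first byte in (lo_bytes[0]+1, hi_bytes[0]-1), all tails
--     # spanning full continuation range.
--     if hi_bytes[0] > lo_bytes[0] + 1:
--         out.append([(lo_bytes[0] + 1, hi_bytes[0] - 1)]
--                    + [(0x80, 0xBF)] * (n - 1))
--     # High-edge: fixed first byte = hi_bytes[0], tail from [0x80]*(n-1)
--     # to hi_bytes[1:].
--     sub = _decompose_same_tier([0x80] * (n - 1), hi_bytes[1:])
--     out.extend([[(hi_bytes[0], hi_bytes[0])] + r for r in sub])
--     return out
-- ===== SOURCE B (Python) =====
-- def _utf8_encode_cp(cp):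
--     """Return the UTF-8 byte list for a code point."""
--     if cp <= 0x7F:
--         return [cp]
--     if cp <= 0x7FF:
--         return [0xC0 | (cp >> 6), 0x80 | (cp & 0x3F)]
--     if cp <= 0xFFFF:
--         return [0xE0 | (cp >> 12), 0x80 | ((cp >> 6) & 0x3F),
--                 0x80 | (cp & 0x3F)]
--     return [0xF0 | (cp >> 18), 0x80 | ((cp >> 12) & 0x3F),
--             0x80 | ((cp >> 6) & 0x3F), 0x80 | (cp & 0x3F)]
--
-- def _utf8_byte_ranges(cp_lo, cp_hi):
--     """Same tier split as before, but the per-tier byte-range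
--     decomposition is an iterative worklist instead of recursion.
--     Each task is (prefix, lo_bytes, hi_bytes); an empty byte list
--     means 'emit prefix as a finished alternative'."""
--     if cp_lo > cp_hi:
--         return []
--     out = []
--     lo = cp_lo
--     for boundary in (0x7F, 0x7FF, 0xFFFF, 0x10FFFF):
--         if lo > boundary:
--             continue
--         sub_hi = min(cp_hi, boundary)
--         stack = [([], _utf8_encode_cp(lo), _utf8_encode_cp(sub_hi))]
--         while stack:
--             prefix, lob, hib = stack.pop()
--             if not lob:
--                 out.append(prefix)
--             elif len(lob) == 1:
--                 out.append(prefix + [(lob[0], hib[0])])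
--             elif lob[0] == hib[0]:
--                 stack.append((prefix + [(lob[0], lob[0])], lob[1:], hib[1:]))
--             else:
--                 n = len(lob)
--                 # push in reverse so tasks pop low-edge, middle, high-edge
--                 stack.append((prefix + [(hib[0], hib[0])],
--                               [0x80] * (n - 1), hib[1:]))
--                 if hib[0] > lob[0] + 1:
--                     stack.append((prefix + [(lob[0] + 1, hib[0] - 1)]
--                                   + [(0x80, 0xBF)] * (n - 1), [], []))
--                 stack.append((prefix + [(lob[0], lob[0])],
--                               lob[1:], [0xBF] * (n - 1)))
--         lo = sub_hi + 1
--         if lo > cp_hi: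
--             break
--     return out
-- ===== Notes on version B (the rewrite author's own statement) =====
-- stated objective: alternative
-- what changed: The recursive _decompose_same_tier helper is replaced by an iterative explicit-stack worklist inside _utf8_byte_ranges: each task carries an accumulated byte-range prefix plus the remaining lo/hi byte lists, and sub-ranges are pushed in reverse so alternatives are emitted in the recursion's order; the tier-splitting loop and _utf8_encode_cp are unchanged.
import Mathlib
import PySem

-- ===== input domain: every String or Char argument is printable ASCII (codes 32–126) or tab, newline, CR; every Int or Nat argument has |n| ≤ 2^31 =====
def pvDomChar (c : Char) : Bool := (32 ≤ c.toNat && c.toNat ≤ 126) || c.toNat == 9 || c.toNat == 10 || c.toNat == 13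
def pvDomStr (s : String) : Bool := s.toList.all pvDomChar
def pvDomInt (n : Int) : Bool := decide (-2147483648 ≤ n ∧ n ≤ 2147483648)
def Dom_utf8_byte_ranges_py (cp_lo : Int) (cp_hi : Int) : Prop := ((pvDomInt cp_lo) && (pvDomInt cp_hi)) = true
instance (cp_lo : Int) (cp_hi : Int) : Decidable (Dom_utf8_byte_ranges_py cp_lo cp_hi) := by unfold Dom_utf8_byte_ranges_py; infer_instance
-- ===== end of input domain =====

-- B replaces the recursive same-tier decomposition by an iterative worklist (explicit stack), same tier loop; objective: alternative decomposition, same cost.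

-- ===== PORT A =====

-- _utf8_encode_cp.  Python's `x | y` on the disjoint bit patterns used here equals `x + y`,
-- and `>>`/`&` on the nonnegative cp of each branch are floordiv/mod: exact for every cp
-- this module ever passes (cp ≤ 0x10FFFF; negative cp take the first branch).
def pvEnc (cp : Int) : List Int :=
  if cp ≤ 0x7F then [cp]
  else if cp ≤ 0x7FF then
    [0xC0 + PySem.Int.floordiv cp 64, 0x80 + PySem.Int.mod cp 64]
  else if cp ≤ 0xFFFF then
    [0xE0 + PySem.Int.floordiv cp 4096,
     0x80 + PySem.Int.mod (PySem.Int.floordiv cp 64) 64,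
     0x80 + PySem.Int.mod cp 64]
  else
    [0xF0 + PySem.Int.floordiv cp 262144,
     0x80 + PySem.Int.mod (PySem.Int.floordiv cp 4096) 64,
     0x80 + PySem.Int.mod (PySem.Int.floordiv cp 64) 64,
     0x80 + PySem.Int.mod cp 64]

-- _decompose_same_tier.  Patterns in Python's branch order; the catch-all arm covers the
-- byte lists Python's assert / indexing would reject (never produced by the entry point).
def pvDecompose (lob hib : List Int) : List (List (Int × Int)) :=
  match lob, hib with
  | [l0], h0 :: _ => [[(l0, h0)]]
  | l0 :: l1 :: ls, h0 :: hs =>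
    if l0 = h0 then
      (pvDecompose (l1 :: ls) hs).map (fun r => (l0, l0) :: r)
    else
      ((pvDecompose (l1 :: ls) (List.replicate (l1 :: ls).length (0xBF : Int))).map
          (fun r => (l0, l0) :: r))
      ++ (if h0 > l0 + 1 then
            [(l0 + 1, h0 - 1) :: List.replicate (l1 :: ls).length ((0x80 : Int), (0xBF : Int))]
          else [])
      ++ ((pvDecompose (List.replicate hs.length (0x80 : Int)) hs).map
          (fun r => (h0, h0) :: r))
  | _, _ => []
termination_by max lob.length hib.length
decreasing_by
  all_goals simp

def pvTiersA : List Int → Int → Int → List (List (Int × Int)) → List (List (Int × Int))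
  | [], _, _, out => out
  | b :: bs, lo, cp_hi, out =>
    if lo > b then pvTiersA bs lo cp_hi out
    else
      let sub_hi := min cp_hi b
      let out' := out ++ pvDecompose (pvEnc lo) (pvEnc sub_hi)
      if sub_hi + 1 > cp_hi then out' else pvTiersA bs (sub_hi + 1) cp_hi out'

def utf8_byte_ranges_py (cp_lo : Int) (cp_hi : Int) : List (List (Int × Int)) :=
  if cp_lo > cp_hi then []
  else pvTiersA [0x7F, 0x7FF, 0xFFFF, 0x10FFFF] cp_lo cp_hi []

-- ===== PORT B =====

-- the `while stack:` worklist of B; a task is (prefix, lo_bytes, hi_bytes), the Lean list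
-- head is the Python stack top.  The catch-all arm drops the task shapes Python's indexing
-- would reject (never produced by the entry point).
def pvAltLoop : List (List (Int × Int) × List Int × List Int) → List (List (Int × Int)) → List (List (Int × Int))
  | [], out => out
  | (pre, lob, hib) :: rest, out =>
    match lob, hib with
    | [], _ => pvAltLoop rest (out ++ [pre])
    | [l0], h0 :: _ => pvAltLoop rest (out ++ [pre ++ [(l0, h0)]])
    | l0 :: l1 :: ls, h0 :: hs =>
      if l0 = h0 then
        pvAltLoop ((pre ++ [(l0, l0)], l1 :: ls, hs) :: rest) out
      else
        -- reverse push order: the Python pushes high-edge, middle, low-edge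
        pvAltLoop ((pre ++ [(l0, l0)], l1 :: ls, List.replicate (l1 :: ls).length (0xBF : Int))
          :: ((if h0 > l0 + 1 then
                [(pre ++ [(l0 + 1, h0 - 1)] ++ List.replicate (l1 :: ls).length ((0x80 : Int), (0xBF : Int)),
                  ([] : List Int), ([] : List Int))]
              else [])
             ++ (pre ++ [(h0, h0)], List.replicate hs.length (0x80 : Int), hs) :: rest)) out
    | _, _ => pvAltLoop rest out
termination_by stack _ => (stack.map (fun t => 4 ^ (max t.2.1.length t.2.2.length) + 1)).sum
decreasing_by
  all_goals simp [Nat.pow_succ]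
  have h1 : (4:ℕ) ^ ls.length * 4 ≤ 4 ^ max (ls.length + 1) hs.length := by
    rw [← pow_succ]; exact Nat.pow_le_pow_right (by norm_num) (le_max_left _ _)
  have h2 : (4:ℕ) ^ hs.length ≤ 4 ^ max (ls.length + 1) hs.length :=
    Nat.pow_le_pow_right (by norm_num) (le_max_right _ _)
  have h3 : (4:ℕ) ≤ 4 ^ max (ls.length + 1) hs.length := by
    conv_lhs => rw [← pow_one 4]
    exact Nat.pow_le_pow_right (by norm_num) (by omega)
  by_cases hc : l0 + 1 < h0 <;> simp [hc] <;> omega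

def pvTiersB : List Int → Int → Int → List (List (Int × Int)) → List (List (Int × Int))
  | [], _, _, out => out
  | b :: bs, lo, cp_hi, out =>
    if lo > b then pvTiersB bs lo cp_hi out
    else
      let sub_hi := min cp_hi b
      let out' := pvAltLoop [(([] : List (Int × Int)), pvEnc lo, pvEnc sub_hi)] out
      if sub_hi + 1 > cp_hi then out' else pvTiersB bs (sub_hi + 1) cp_hi out'

def utf8_byte_ranges_py_alt (cp_lo : Int) (cp_hi : Int) : List (List (Int × Int)) :=
  if cp_lo > cp_hi then []
  else pvTiersB [0x7F, 0x7FF, 0xFFFF, 0x10FFFF] cp_lo cp_hi []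

-- ===== PRECONDITION & SPEC =====
def Spec_utf8_byte_ranges_py (cp_lo : Int) (cp_hi : Int) (out : List (List (Int × Int))) : Prop := out = utf8_byte_ranges_py_alt cp_lo cp_hi
instance (cp_lo : Int) (cp_hi : Int) (out : List (List (Int × Int))) : Decidable (Spec_utf8_byte_ranges_py cp_lo cp_hi out) := by unfold Spec_utf8_byte_ranges_py; infer_instance

-- ===== CLAIM (what is proved, stated in full; the proofs are below) =====
def Claim_equal_utf8_byte_ranges_py : Prop := ∀ (cp_lo : Int) (cp_hi : Int), Dom_utf8_byte_ranges_py cp_lo cp_hi → Spec_utf8_byte_ranges_py cp_lo cp_hi (utf8_byte_ranges_py cp_lo cp_hi)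

-- ===== LEMMAS AND PROOFS =====

-- what one worklist task contributes to `out`
def pvTaskOut (t : List (Int × Int) × List Int × List Int) : List (List (Int × Int)) :=
  if t.2.1 = ([] : List Int) then [t.1]
  else (pvDecompose t.2.1 t.2.2).map (fun r => t.1 ++ r)

-- a task never gets strictly longer lo_bytes than hi_bytes (unless trivial)
def pvOk (t : List (Int × Int) × List Int × List Int) : Prop :=
  t.2.1.length ≤ t.2.2.length ∨ t.2.1.length ≤ 1

theorem pvAltLoop_eq : ∀ (stack : List (List (Int × Int) × List Int × List Int))
    (out : List (List (Int × Int))), (∀ t ∈ stack, pvOk t) →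
    pvAltLoop stack out = out ++ stack.flatMap pvTaskOut := by
  intro stack out
  induction stack, out using pvAltLoop.induct with
  | case1 out => intro _; simp [pvAltLoop]
  | case2 pre hib rest out ih =>
    intro h
    rw [pvAltLoop, ih (fun t ht => h t (List.mem_cons_of_mem _ ht))]
    simp [pvTaskOut]
  | case3 pre rest out l0 h0 tail ih =>
    intro h
    rw [pvAltLoop, ih (fun t ht => h t (List.mem_cons_of_mem _ ht))]
    simp [pvTaskOut, pvDecompose]
  | case4 pre rest out l1 ls h0 hs ih =>
    intro h
    have hok := h _ List.mem_cons_self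
    have hrest := fun t ht => h t (List.mem_cons_of_mem _ ht)
    simp only [pvOk, List.length_cons] at hok
    have hihs : pvAltLoop ((pre ++ [(h0, h0)], l1 :: ls, hs) :: rest) out
        = out ++ List.flatMap pvTaskOut ((pre ++ [(h0, h0)], l1 :: ls, hs) :: rest) := by
      refine ih ?_
      intro t ht
      rcases List.mem_cons.mp ht with rfl | ht'
      · exact Or.inl (by simp; omega)
      · exact hrest t ht'
    rw [pvAltLoop.eq_def]
    simp only [hihs]
    simp [pvTaskOut, pvDecompose, List.map_map, Function.comp_def, List.append_assoc]
  | case5 pre rest out l0 l1 ls h0 hs hne ih =>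
    intro h
    have hok := h _ List.mem_cons_self
    have hrest := fun t ht => h t (List.mem_cons_of_mem _ ht)
    simp only [pvOk, List.length_cons] at hok
    have hlen : ls.length + 1 ≤ hs.length := by omega
    specialize ih ?hall
    case hall =>
      intro t ht
      simp only [List.mem_cons, List.mem_append] at ht
      rcases ht with rfl | ⟨hmid | rfl | ht'⟩
      · exact Or.inl (by simp)
      · split at hmid <;> simp at hmid
        subst hmid; exact Or.inr (by simp)
      · exact Or.inl (by simp)
      · exact hrest t ht'
    rw [pvAltLoop.eq_def]
    simp only [if_neg hne]
    simp only [dite_eq_ite] at ih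
    rw [ih]
    have hrep : List.replicate hs.length (0x80 : Int) ≠ [] := by
      have h0' : hs.length ≠ 0 := by omega
      simp [h0']
    by_cases hc : h0 > l0 + 1 <;>
      simp [hc, pvTaskOut, pvDecompose, hne, hrep, List.map_map, Function.comp_def,
        List.append_assoc]
  | case6 pre lob hib rest out hx1 hx2 hx3 ih =>
    intro h
    have hrest := fun t ht => h t (List.mem_cons_of_mem _ ht)
    have hhib : hib = [] := by
      rcases hib with _ | ⟨h0, hs⟩
      · rfl
      · rcases lob with _ | ⟨a, _ | ⟨b, tl⟩⟩
        · exact absurd rfl hx1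
        · exact absurd rfl (hx2 a h0 hs rfl)
        · exact absurd rfl (hx3 a b tl h0 hs rfl)
    subst hhib
    rcases lob with _ | ⟨a, _ | ⟨b, tl⟩⟩
    · exact absurd rfl hx1
    · rw [pvAltLoop.eq_def]
      simp [ih hrest, pvTaskOut, pvDecompose]
    · rw [pvAltLoop.eq_def]
      simp [ih hrest, pvTaskOut, pvDecompose]

theorem pvEncLen_mono {x y : Int} (h : x ≤ y) : (pvEnc x).length ≤ (pvEnc y).length := by
  unfold pvEnc; split_ifs <;> (try simp) <;> (try omega)

theorem pvEnc_ne_nil (x : Int) : pvEnc x ≠ [] := by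
  unfold pvEnc; split_ifs <;> simp

theorem pvTier_eq (lo hi : Int) (h : lo ≤ hi) (out : List (List (Int × Int))) :
    pvAltLoop [(([] : List (Int × Int)), pvEnc lo, pvEnc hi)] out
      = out ++ pvDecompose (pvEnc lo) (pvEnc hi) := by
  rw [pvAltLoop_eq]
  · simp [pvTaskOut, pvEnc_ne_nil]
  · intro t ht
    simp at ht
    subst ht
    exact Or.inl (pvEncLen_mono h)

theorem pvTiers_eq (cp_hi : Int) : ∀ (bs : List Int) (lo : Int) (out : List (List (Int × Int))),
    lo ≤ cp_hi → pvTiersB bs lo cp_hi out = pvTiersA bs lo cp_hi out := by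
  intro bs
  induction bs with
  | nil => intro lo out _; rfl
  | cons b bs ih =>
    intro lo out hlo
    simp only [pvTiersA, pvTiersB]
    by_cases hb : lo > b
    · simp [hb, ih _ _ hlo]
    · have hsub : lo ≤ min cp_hi b := le_min hlo (by omega)
      simp only [hb, if_false, pvTier_eq _ _ hsub]
      by_cases hbrk : min cp_hi b + 1 > cp_hi
      · simp [hbrk]
      · have hrec := ih (min cp_hi b + 1)
          (out ++ pvDecompose (pvEnc lo) (pvEnc (min cp_hi b))) (by omega)
        simp [hbrk, hrec]

theorem pv_main (cp_lo cp_hi : Int) :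
    utf8_byte_ranges_py cp_lo cp_hi = utf8_byte_ranges_py_alt cp_lo cp_hi := by
  unfold utf8_byte_ranges_py utf8_byte_ranges_py_alt
  by_cases h : cp_lo > cp_hi
  · simp [h]
  · simp [h, pvTiers_eq cp_hi _ cp_lo [] (by omega)]

-- ===== VERDICT (by name: the statement is the Claim_ definition above) =====
theorem utf8_byte_ranges_py_spec : Claim_equal_utf8_byte_ranges_py := by
  intro cp_lo cp_hi _
  unfold Spec_utf8_byte_ranges_py
  exact pv_main cp_lo cp_hi
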